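-- pv_equiv track=rewrite | github.com/PterosDiacos/Lambek-Sequent-Calculus | main.py | deAbbr
-- ===== SOURCE A (Python) =====
-- def deAbbr(con: str, pres: list, abbr: dict):
--     def gen(L):
--         if L:
--             head, *tail = L
--             for hopt in abbr.get(head, [head]):
--                 for topt in gen(tail):
--                     yield [hopt] + topt
--         else:
--             yield []
--     for con, *pres in gen([con] + pres):
--         yield con, pres
-- ===== SOURCE B (Python) =====
-- def deAbbr(con, pres, abbr):
--     options = [abbr.get(x, [x]) for x in [con] + pres]
--     combos = [[]]
--     for opts in options:
--         combos = [p + [o] for p in combos for o in opts]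
--     for c in combos:
--         yield c[0], c[1:]
-- ===== Notes on version B (the rewrite author's own statement) =====
-- stated objective: alternative
-- what changed: Replaces A's recursive generator (which re-runs gen(tail) from scratch for every head option, suffix-first) with an iterative left fold that materialises the product once, extending prefixes one option-list at a time, then splits each combo into head and tail.
import Mathlib
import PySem

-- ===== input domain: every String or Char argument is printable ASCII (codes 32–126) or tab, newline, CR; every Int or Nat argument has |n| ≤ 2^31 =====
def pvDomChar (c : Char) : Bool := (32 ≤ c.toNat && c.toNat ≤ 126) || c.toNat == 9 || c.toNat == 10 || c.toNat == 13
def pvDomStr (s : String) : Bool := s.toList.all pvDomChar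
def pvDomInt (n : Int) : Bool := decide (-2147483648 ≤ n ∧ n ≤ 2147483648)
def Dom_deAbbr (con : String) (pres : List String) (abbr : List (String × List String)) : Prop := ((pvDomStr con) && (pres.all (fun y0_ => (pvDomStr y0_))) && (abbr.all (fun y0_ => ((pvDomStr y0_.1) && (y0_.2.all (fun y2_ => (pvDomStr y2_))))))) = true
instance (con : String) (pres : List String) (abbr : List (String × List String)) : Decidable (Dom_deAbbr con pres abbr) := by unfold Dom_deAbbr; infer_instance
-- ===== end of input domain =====

-- ===== PORT A =====
-- B changes: iterative left fold materialising prefix products once, instead of A's recursive suffix-first generator that re-runs gen(tail) per head option (objective: alternative).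
-- gen(L): recursive generator over the remaining slots (suffix-first product)
def pvGenA (abbr : List (String × List String)) : List String → List (List String)
  | [] => [[]]
  | head :: tail =>
      (((abbr.lookup head).getD [head])).flatMap (fun hopt =>
        (pvGenA abbr tail).map (fun topt => [hopt] ++ topt))

-- 'for con, *pres in gen([con] + pres): yield con, pres' — every yielded list is nonempty, so the [] arm is never taken
def deAbbr (con : String) (pres : List String) (abbr : List (String × List String)) : List (String × List String) :=
  (pvGenA abbr ([con] ++ pres)).filterMap (fun c =>
    match c with
    | h :: t => some (h, t)
    | [] => none)

-- ===== PORT B =====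
def deAbbr_alt (con : String) (pres : List String) (abbr : List (String × List String)) : List (String × List String) :=
  (((([con] ++ pres).map (fun x => (abbr.lookup x).getD [x])).foldl
      (fun acc opts => acc.flatMap (fun p => opts.map (fun o => p ++ [o]))) [[]])).filterMap (fun c =>
    match c with
    | h :: t => some (h, t)
    | [] => none)

-- ===== PRECONDITION & SPEC =====
def Spec_deAbbr (con : String) (pres : List String) (abbr : List (String × List String)) (out : List (String × List String)) : Prop := out = deAbbr_alt con pres abbr
instance (con : String) (pres : List String) (abbr : List (String × List String)) (out : List (String × List String)) : Decidable (Spec_deAbbr con pres abbr out) := by unfold Spec_deAbbr; infer_instance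

-- ===== CLAIM (what is proved, stated in full; the proofs are below) =====
def Claim_equal_deAbbr : Prop := ∀ (con : String) (pres : List String) (abbr : List (String × List String)), Dom_deAbbr con pres abbr → Spec_deAbbr con pres abbr (deAbbr con pres abbr)

-- ===== LEMMAS AND PROOFS =====
lemma pv_foldl_prod (os : List (List String)) (acc : List (List String)) :
    os.foldl (fun acc opts => acc.flatMap (fun p => opts.map (fun o => p ++ [o]))) acc =
      acc.flatMap (fun p =>
        (os.foldr (fun opts r => opts.flatMap (fun h => r.map (fun s => h :: s))) [[]]).map
          (fun s => p ++ s)) := by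
  induction os generalizing acc with
  | nil => simp
  | cons o os ih =>
      rw [List.foldl_cons, ih]
      simp only [List.foldr_cons, List.flatMap_assoc, List.flatMap_map, List.map_flatMap, List.map_map]
      refine List.flatMap_congr (fun p _ => ?_)
      refine List.flatMap_congr (fun o _ => ?_)
      refine List.map_congr_left (fun s _ => ?_)
      rw [List.append_assoc]
      rfl

lemma pv_genA_eq_foldr (abbr : List (String × List String)) (L : List String) :
    pvGenA abbr L =
      (L.map (fun x => (abbr.lookup x).getD [x])).foldr
        (fun opts r => opts.flatMap (fun h => r.map (fun s => h :: s))) [[]] := by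
  induction L with
  | nil => rfl
  | cons h t ih => simp [pvGenA, ih]

-- ===== VERDICT (by name: the statement is the Claim_ definition above) =====
theorem deAbbr_spec : Claim_equal_deAbbr := by
  intro con pres abbr _
  show deAbbr con pres abbr = deAbbr_alt con pres abbr
  unfold deAbbr deAbbr_alt
  rw [pv_genA_eq_foldr, pv_foldl_prod]
  simp
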